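-- pv_equiv track=rewrite | github.com/joaojunior/hackerrank | rearrange-a-string/rearrange_a_string.py | rearrange_a_string
-- ===== SOURCE A (Python) =====
-- def rearrange_a_string(string):
--     sum_ = 0
--     result = []
--     for i in string:
--         if i.isdigit():
--             sum_ += int(i)
--         else:
--             result.append(i)
--     result.sort()
--     result.append(str(sum_))
--     return ''.join(result)
-- ===== SOURCE B (Python) =====
-- def rearrange_a_string(string):
--     total = sum(int(ch) for ch in string if ch.isdigit())
--     counts = [0] * 128
--     for ch in string:
--         if not ch.isdigit():
--             counts[ord(ch)] += 1
--     out = []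
--     for code in range(128):
--         out.extend([chr(code)] * counts[code])
--     out.append(str(total))
--     return ''.join(out)
-- ===== Notes on version B (the rewrite author's own statement) =====
-- stated objective: alternative
-- what changed: replaces the comparison sort of the non-digit characters with a counting sort: the digit sum is a generator-sum, one pass fills a 128-slot count array indexed by character code, and a sweep over the 128 codes emits each character count times in code order
import Mathlib
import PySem

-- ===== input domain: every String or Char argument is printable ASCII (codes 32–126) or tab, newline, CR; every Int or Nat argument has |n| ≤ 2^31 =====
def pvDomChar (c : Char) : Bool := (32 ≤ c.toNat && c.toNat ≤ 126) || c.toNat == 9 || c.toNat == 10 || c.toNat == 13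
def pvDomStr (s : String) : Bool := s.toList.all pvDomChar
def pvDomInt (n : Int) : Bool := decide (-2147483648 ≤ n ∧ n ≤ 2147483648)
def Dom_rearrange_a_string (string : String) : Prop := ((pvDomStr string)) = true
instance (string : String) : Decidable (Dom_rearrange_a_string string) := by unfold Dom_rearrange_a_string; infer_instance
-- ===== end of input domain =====

-- B replaces A's comparison sort of the non-digit characters with a counting sort over the 128 ASCII codes.

-- ===== PORT A =====
def rearrange_a_string (string : String) : String :=
  let st := string.toList.foldl
    (fun (acc : Int × List Char) i =>
      if PySem.Chars.isdigit i then (acc.1 + ((PySem.Int.ofChars? [i]).getD 0), acc.2)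
      else (acc.1, acc.2 ++ [i]))
    ((0 : Int), ([] : List Char))
  let result := PySem.List.sorted st.2 (fun c => c) false
  String.mk (PySem.Chars.join [] (result.map (fun c => [c]) ++ [PySem.Int.toChars st.1]))

-- ===== PORT B =====
-- 'counts[ord(ch)] += 1' is ported as List.set/List.getD: exact whenever ord(ch) < 128,
-- which holds for every character admitted by Dom_ (Python raises IndexError outside, not claimed).
def rearrange_a_string_alt (string : String) : String :=
  let total : Int := ((string.toList.filter (fun ch => PySem.Chars.isdigit ch)).map
      (fun ch => (PySem.Int.ofChars? [ch]).getD 0)).sum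
  let counts := string.toList.foldl
    (fun (cs : List Int) ch =>
      if !PySem.Chars.isdigit ch then cs.set ch.toNat (cs.getD ch.toNat 0 + 1) else cs)
    (List.replicate 128 (0 : Int))
  let out := (PySem.List.pyRange 0 128 1).foldl
    (fun (out : List (List Char)) code =>
      out ++ PySem.List.pyRepeat [[Char.ofNat code.toNat]] (counts.getD code.toNat 0)) []
  String.mk (PySem.Chars.join [] (out ++ [PySem.Int.toChars total]))

-- ===== PRECONDITION & SPEC =====
def Spec_rearrange_a_string (string : String) (out : String) : Prop := out = rearrange_a_string_alt string
instance (string : String) (out : String) : Decidable (Spec_rearrange_a_string string out) := by unfold Spec_rearrange_a_string; infer_instance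

-- ===== CLAIM (what is proved, stated in full; the proofs are below) =====
def Claim_equal_rearrange_a_string : Prop := ∀ (string : String), Dom_rearrange_a_string string → Spec_rearrange_a_string string (rearrange_a_string string)

-- ===== LEMMAS AND PROOFS =====

-- the blocks a counting sort emits: for each code in [lo, lo+n), (f code) copies of that character
def pvBlocks (f : Char → Nat) (lo n : Nat) : List Char :=
  ((List.range' lo n).map (fun code => List.replicate (f (Char.ofNat code)) (Char.ofNat code))).flatten

lemma pvToNat_ofNat {n : Nat} (h : n < 128) : (Char.ofNat n).toNat = n := by
  have hv : n.isValidChar := Or.inl (by omega)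
  unfold Char.ofNat
  split
  · simp [Char.toNat, Char.ofNatAux]
  · contradiction

lemma pvChar_toNat_inj {a b : Char} (h : a.toNat = b.toNat) : a = b := by
  apply Char.ext; rw [Char.toNat] at h; rw [Char.toNat] at h; exact UInt32.toNat_inj.mp h

lemma pvChar_le {a b : Char} (h : a.toNat ≤ b.toNat) : a ≤ b := by
  rw [Char.le_def, UInt32.le_iff_toNat_le]; exact h

lemma pvBlocks_succ (f : Char → Nat) (lo n : Nat) :
    pvBlocks f lo (n + 1) =
      List.replicate (f (Char.ofNat lo)) (Char.ofNat lo) ++ pvBlocks f (lo + 1) n := by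
  simp [pvBlocks, List.range'_succ]

lemma pvBlocks_mem {f : Char → Nat} {x : Char} : ∀ {n lo : Nat}, x ∈ pvBlocks f lo n →
    lo + n ≤ 128 → lo ≤ x.toNat ∧ x.toNat < lo + n := by
  intro n
  induction n with
  | zero => intro lo hx _; simp [pvBlocks] at hx
  | succ m ih =>
    intro lo hx hle
    rw [pvBlocks_succ, List.mem_append] at hx
    rcases hx with hx | hx
    · have := List.eq_of_mem_replicate hx
      subst this
      rw [pvToNat_ofNat (by omega)]
      omega
    · have := ih hx (by omega)
      omega

lemma pvBlocks_count (f : Char → Nat) (a : Char) : ∀ (n lo : Nat), lo + n ≤ 128 →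
    (pvBlocks f lo n).count a = if lo ≤ a.toNat ∧ a.toNat < lo + n then f a else 0 := by
  intro n
  induction n with
  | zero => intro lo _; simp [pvBlocks]
  | succ m ih =>
    intro lo hle
    rw [pvBlocks_succ, List.count_append, List.count_replicate, ih (lo + 1) (by omega)]
    by_cases ha : Char.ofNat lo = a
    · have hta : a.toNat = lo := by rw [← ha, pvToNat_ofNat (by omega)]
      simp [ha, hta]
    · have hne : ¬ a.toNat = lo := by
        intro h
        exact ha (pvChar_toNat_inj (by rw [pvToNat_ofNat (by omega), h]))
      simp only [beq_iff_eq, ha, if_false]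
      split <;> split <;> omega

lemma pvBlocks_sorted (f : Char → Nat) : ∀ (n lo : Nat), lo + n ≤ 128 →
    (pvBlocks f lo n).Pairwise (· ≤ ·) := by
  intro n
  induction n with
  | zero => intro lo _; simp [pvBlocks]
  | succ m ih =>
    intro lo hle
    rw [pvBlocks_succ, List.pairwise_append]
    refine ⟨List.pairwise_replicate.mpr (Or.inr le_rfl), ih (lo + 1) (by omega), ?_⟩
    intro x hx y hy
    have hxe := List.eq_of_mem_replicate hx
    subst hxe
    have hy' := pvBlocks_mem hy (by omega)
    exact pvChar_le (by rw [pvToNat_ofNat (by omega)]; omega)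

lemma pvIntersperse_flatten : ∀ (l : List (List Char)), (List.intersperse ([] : List Char) l).flatten = l.flatten
  | [] => rfl
  | [x] => by simp
  | x :: y :: u => by
    show (x :: [] :: List.intersperse [] (y :: u)).flatten = _
    rw [List.flatten_cons, List.flatten_cons, pvIntersperse_flatten (y :: u)]
    simp

lemma pvJoin_nil_flatten (l : List (List Char)) : PySem.Chars.join [] l = l.flatten := by
  show List.intercalate [] l = l.flatten
  rw [List.intercalate, pvIntersperse_flatten]

lemma pvRange128 : PySem.List.pyRange 0 128 1 = (List.range' 0 128).map Int.ofNat := by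
  decide

-- the count-array invariant: after the counting pass, slot k holds its initial value plus
-- the number of processed characters whose code is k (all codes assumed in range)
lemma pvCounts_getD : ∀ (L : List Char) (cs : List Int) (k : Nat),
    (∀ c ∈ L, c.toNat < cs.length) →
    (L.foldl (fun cs ch => cs.set ch.toNat (cs.getD ch.toNat 0 + 1)) cs).getD k 0
      = cs.getD k 0 + (L.countP (fun c => c.toNat == k) : Int) := by
  intro L
  induction L with
  | nil => intro cs k _; simp
  | cons h t ih =>
    intro cs k hlt
    have hh : h.toNat < cs.length := hlt h (List.mem_cons_self)
    rw [List.foldl_cons, ih _ k (by intro c hc; rw [List.length_set]; exact hlt c (List.mem_cons_of_mem _ hc))]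
    by_cases hk : h.toNat = k
    · subst hk
      have hset : (cs.set h.toNat (cs.getD h.toNat 0 + 1)).getD h.toNat 0 = cs.getD h.toNat 0 + 1 := by
        simp [List.getD, hh]
      rw [hset, List.countP_cons]
      simp
      ring
    · have hset : (cs.set h.toNat (cs.getD h.toNat 0 + 1)).getD k 0 = cs.getD k 0 := by
        simp [List.getD, hk]
      rw [hset, List.countP_cons]
      simp [hk]

lemma pvFlatten_flatMap {α : Type} (g : α → List (List Char)) :
    ∀ (l : List α), (l.flatMap g).flatten = l.flatMap (fun x => (g x).flatten) := by
  intro l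
  induction l with
  | nil => rfl
  | cons h t ih => simp [List.flatMap_cons, ih]

lemma pvFlatten_replicate (n : Nat) (c : Char) :
    (List.replicate n [c]).flatten = List.replicate n c := by
  induction n with
  | zero => rfl
  | succ m ih => simp [List.replicate_succ, ih]

-- ===== VERDICT (by name: the statement is the Claim_ definition above) =====
theorem rearrange_a_string_spec : Claim_equal_rearrange_a_string := by
  intro s hdom
  show rearrange_a_string s = rearrange_a_string_alt s
  have h128 : ∀ c ∈ s.toList, c.toNat < 128 := by
    intro c hc
    have hd := List.all_eq_true.mp hdom c hc
    simp only [pvDomChar, Bool.or_eq_true, Bool.and_eq_true, decide_eq_true_eq, beq_iff_eq] at hd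
    omega
  -- A's single loop is two independent loops
  have h1 : s.toList.foldl
      (fun (acc : Int × List Char) i =>
        if PySem.Chars.isdigit i then (acc.1 + ((PySem.Int.ofChars? [i]).getD 0), acc.2)
        else (acc.1, acc.2 ++ [i])) ((0 : Int), ([] : List Char))
      = (s.toList.foldl (fun a i => if PySem.Chars.isdigit i then a + ((PySem.Int.ofChars? [i]).getD 0) else a) 0,
         s.toList.foldl (fun r i => if PySem.Chars.isdigit i then r else r ++ [i]) []) := by
    have hstep : (fun (acc : Int × List Char) i =>
        if PySem.Chars.isdigit i then (acc.1 + ((PySem.Int.ofChars? [i]).getD 0), acc.2)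
        else (acc.1, acc.2 ++ [i]))
      = (fun (acc : Int × List Char) i =>
        ((if PySem.Chars.isdigit i then acc.1 + ((PySem.Int.ofChars? [i]).getD 0) else acc.1),
         (if PySem.Chars.isdigit i then acc.2 else acc.2 ++ [i]))) := by
      funext acc i; by_cases h : PySem.Chars.isdigit i <;> simp [h]
    rw [hstep]
    exact PySem.List.foldl_prod_mk
      (f := fun a i => if PySem.Chars.isdigit i then a + ((PySem.Int.ofChars? [i]).getD 0) else a)
      (g := fun r i => if PySem.Chars.isdigit i then r else r ++ [i]) _ _ _
  -- A's digit sum = B's generator sum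
  have hsum : s.toList.foldl (fun a i => if PySem.Chars.isdigit i then a + ((PySem.Int.ofChars? [i]).getD 0) else a) 0
      = ((s.toList.filter (fun ch => PySem.Chars.isdigit ch)).map
          (fun ch => (PySem.Int.ofChars? [ch]).getD 0)).sum := by
    rw [PySem.List.foldl_if_eq_foldl_filter (fun i => PySem.Chars.isdigit i)
          (fun a i => a + ((PySem.Int.ofChars? [i]).getD 0))]
    rw [PySem.List.foldl_add]
    simp
  -- A's non-digit pass is a filter
  have hres : s.toList.foldl (fun r i => if PySem.Chars.isdigit i then r else r ++ [i]) []
      = s.toList.filter (fun i => !PySem.Chars.isdigit i) := by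
    have hstep : (fun (r : List Char) i => if PySem.Chars.isdigit i then r else r ++ [i])
      = (fun (r : List Char) i => if !PySem.Chars.isdigit i then r ++ [i] else r) := by
      funext r i; by_cases h : PySem.Chars.isdigit i <;> simp [h]
    rw [hstep]
    simpa using PySem.List.foldl_append_if_eq_filter (fun i => !PySem.Chars.isdigit i) s.toList []
  set L := s.toList.filter (fun i => !PySem.Chars.isdigit i) with hL
  have hLsub : ∀ c ∈ L, c.toNat < 128 := fun c hc => h128 c (List.mem_of_mem_filter hc)
  -- B's count array holds L's character counts
  have hcounts : ∀ k : Nat, k < 128 →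
      (s.toList.foldl (fun (cs : List Int) ch =>
          if !PySem.Chars.isdigit ch then cs.set ch.toNat (cs.getD ch.toNat 0 + 1) else cs)
        (List.replicate 128 (0 : Int))).getD k 0
      = (L.count (Char.ofNat k) : Int) := by
    intro k hk
    rw [PySem.List.foldl_if_eq_foldl_filter (fun ch => !PySem.Chars.isdigit ch)
          (fun (cs : List Int) (ch : Char) => cs.set ch.toNat (cs.getD ch.toNat 0 + 1)), ← hL]
    rw [pvCounts_getD L _ k (by intro c hc; rw [List.length_replicate]; exact hLsub c hc)]
    have hrep : (List.replicate 128 (0 : Int)).getD k 0 = 0 := by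
      rw [List.getD_eq_getElem?_getD, List.getElem?_replicate]
      split <;> simp
    rw [hrep, zero_add]
    have : L.countP (fun c => c.toNat == k) = L.count (Char.ofNat k) := by
      unfold List.count
      apply List.countP_congr
      intro c _
      constructor
      · intro h
        exact beq_iff_eq.mpr (pvChar_toNat_inj (by rw [beq_iff_eq.mp h, pvToNat_ofNat hk]))
      · intro h
        rw [beq_iff_eq.mp h]
        exact beq_iff_eq.mpr (pvToNat_ofNat hk)
    rw [this]
  -- sorted L is exactly the counting-sort blocks
  have hperm : (pvBlocks L.count 0 128).Perm L := by
    rw [List.perm_iff_count]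
    intro a
    rw [pvBlocks_count L.count a 128 0 (by omega)]
    by_cases ha : a.toNat < 128
    · simp [ha]
    · have hnm : a ∉ L := fun h => ha (hLsub a h)
      simp [List.count_eq_zero.mpr hnm, ha]
  have hsorted : PySem.List.sorted L (fun c => c) false = pvBlocks L.count 0 128 :=
    PySem.List.sorted_id_eq_of_perm_of_pairwise _ _ hperm (pvBlocks_sorted L.count 128 0 (by omega))
  unfold rearrange_a_string rearrange_a_string_alt
  simp only [h1, hsum, hres]
  -- B's extend loop is a flatMap over the range
  rw [PySem.List.foldl_append_eq_flatMap
        (g := fun (code : Int) => PySem.List.pyRepeat [[Char.ofNat code.toNat]]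
          ((s.toList.foldl (fun (cs : List Int) ch =>
              if !PySem.Chars.isdigit ch then cs.set ch.toNat (cs.getD ch.toNat 0 + 1) else cs)
            (List.replicate 128 (0 : Int))).getD code.toNat 0))]
  rw [pvJoin_nil_flatten, pvJoin_nil_flatten]
  simp only [List.nil_append, List.flatten_append, List.flatten_cons, List.flatten_nil, List.append_nil]
  have hms : ∀ (l : List Char), (l.map (fun c => [c])).flatten = l := by
    intro l; induction l <;> simp_all
  rw [hms, hsorted, pvFlatten_flatMap, pvRange128, List.flatMap_map]
  unfold pvBlocks
  rw [← List.flatMap_def]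
  congr 1
  congr 1
  apply List.flatMap_congr
  intro k hk
  have hk128 : k < 128 := by
    have := List.mem_range'.mp hk; omega
  simp only [PySem.List.pyRepeat_singleton, pvFlatten_replicate]
  have hck : (Int.ofNat k).toNat = k := rfl
  rw [hck, hcounts k hk128, Int.toNat_natCast]
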